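-- pv_equiv track=rewrite | github.com/pradyuman-verma/CodeForcesProblems | A/A_Make_a_triangle_.py | ans
-- ===== SOURCE A (Python) =====
-- def ans(arr):
--     arr.sort()
--     a, b, c = arr[0], arr[1], arr[2]
--     if(a + b > c):
--         return(0)
--     cnt = 0
--     while a + b <= c:
--         a += 1
--         cnt += 1
--     return cnt
-- ===== SOURCE B (Python) =====
-- def ans(arr):
--     arr.sort()
--     a, b, c = arr[0], arr[1], arr[2]
--     return max(0, c - a - b + 1)
-- ===== Notes on version B (the rewrite author's own statement) =====
-- stated objective: faster
-- what changed: Replaced the unit-increment while loop counting until a+b>c by the closed form max(0, c-a-b+1) on the three smallest elements; intended as faster (removes the O(c) loop; measured 4.7x on reversed inputs, ~1.5x on random ones where the loop is short).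
import Mathlib
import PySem

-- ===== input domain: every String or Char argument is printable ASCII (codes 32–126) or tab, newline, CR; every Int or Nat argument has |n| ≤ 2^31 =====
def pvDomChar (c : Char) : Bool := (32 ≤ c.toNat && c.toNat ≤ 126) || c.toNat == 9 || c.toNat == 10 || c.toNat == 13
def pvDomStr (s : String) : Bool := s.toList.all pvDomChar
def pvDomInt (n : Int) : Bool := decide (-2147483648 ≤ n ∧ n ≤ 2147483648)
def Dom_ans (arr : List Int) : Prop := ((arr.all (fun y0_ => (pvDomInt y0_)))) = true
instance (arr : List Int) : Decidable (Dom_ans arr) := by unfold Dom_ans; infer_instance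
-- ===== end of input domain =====

-- B replaces A's unit-increment counting loop by the closed form max(0, c-a-b+1);
-- equivalence is about the RETURN value only (A and B both sort the caller's list in place).

-- ===== PORT A =====
-- while a + b <= c: a += 1; cnt += 1   (terminates: c - a - b decreases)
def ansLoop (a b c cnt : Int) : Int :=
  if a + b ≤ c then ansLoop (a + 1) b c (cnt + 1) else cnt
termination_by (c - a - b + 1).toNat
decreasing_by omega

def ans (arr : List Int) : Int :=
  let s := PySem.List.sorted arr (fun x => x) false
  let a := (PySem.List.pyGet? s 0).getD 0   -- Pre_ans guarantees the index is in range
  let b := (PySem.List.pyGet? s 1).getD 0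
  let c := (PySem.List.pyGet? s 2).getD 0
  if a + b > c then 0
  else ansLoop a b c 0

-- ===== PORT B =====
def ans_alt (arr : List Int) : Int :=
  let s := PySem.List.sorted arr (fun x => x) false
  let a := (PySem.List.pyGet? s 0).getD 0   -- Pre_ans guarantees the index is in range
  let b := (PySem.List.pyGet? s 1).getD 0
  let c := (PySem.List.pyGet? s 2).getD 0
  max 0 (c - a - b + 1)

-- ===== PRECONDITION & SPEC =====
-- A indexes the first three elements of the sorted list: it raises IndexError on lists shorter than 3 (so does B).
def Pre_ans (arr : List Int) : Prop := 3 ≤ arr.length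
instance (arr : List Int) : Decidable (Pre_ans arr) := by unfold Pre_ans; infer_instance
def pvWitness_ans : List Int := [3, 1, 7]

def Spec_ans (arr : List Int) (out : Int) : Prop := out = ans_alt arr
instance (arr : List Int) (out : Int) : Decidable (Spec_ans arr out) := by unfold Spec_ans; infer_instance

-- ===== CLAIM (what is proved, stated in full; the proofs are below) =====
def Claim_equal_ans : Prop := ∀ (arr : List Int), Dom_ans arr → Pre_ans arr → Spec_ans arr (ans arr)

-- ===== LEMMAS AND PROOFS =====

-- ===== VERDICT (by name: the statement is the Claim_ definition above) =====
theorem ansLoop_eq (a b c cnt : Int) : ansLoop a b c cnt = cnt + max 0 (c - a - b + 1) := by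
  fun_induction ansLoop a b c cnt <;> omega

theorem ans_spec : Claim_equal_ans := by
  intro arr _ _
  unfold Spec_ans ans ans_alt
  dsimp only
  split_ifs with h
  · omega
  · rw [ansLoop_eq]; omega
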